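-- pv_equiv track=rewrite | github.com/joshanashakya/dissertation | workspace/dataset/java-python/GeeksForGeeks/1903/A/2.py | minRemove
-- ===== SOURCE A (Python) =====
-- def minRemove(a, b, n, m):
--
--     # To store count of array element
--     countA = dict()
--     countB = dict()
--
--     # Count elements of a
--     for i in range(n):
--         countA[a[i]] = countA.get(a[i], 0) + 1
--
--     # Count elements of b
--     for i in range(n):
--         countB[b[i]] = countB.get(b[i], 0) + 1
--
--     # Traverse through all common
--     # element, and pick minimum
--     # occurrence from two arrays
--     res = 0
--     for x in countA:
--         if x in countB.keys():
--             res += min(countA[x],countB[x])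
--
--     # To return count of
--     # minimum elements
--     return res
-- ===== SOURCE B (Python) =====
-- def minRemove(a, b, n, m):
--     # Greedy pair matching: for each element of a's prefix, remove one matching
--     # occurrence from b's prefix; the number of matched pairs is the answer.
--     # No counters and no min(): matching each occurrence individually yields
--     # exactly min(countA(x), countB(x)) pairs per value x.
--     aa = [a[i] for i in range(n)]
--     bb = [b[i] for i in range(n)]  # mirrors A, which reads b with n (not m)
--     res = 0
--     for x in aa:
--         if x in bb:
--             bb.remove(x)
--             res += 1
--     return res
-- ===== Notes on version B (the rewrite author's own statement) =====
-- stated objective: alternative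
-- what changed: Replaces two hash-counter passes plus a min-of-counts sum over distinct keys with greedy one-to-one pair matching: walk a's prefix and destructively remove one matching occurrence from a copy of b's prefix per element, counting removals (multiset intersection computed pairwise).
import Mathlib
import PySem

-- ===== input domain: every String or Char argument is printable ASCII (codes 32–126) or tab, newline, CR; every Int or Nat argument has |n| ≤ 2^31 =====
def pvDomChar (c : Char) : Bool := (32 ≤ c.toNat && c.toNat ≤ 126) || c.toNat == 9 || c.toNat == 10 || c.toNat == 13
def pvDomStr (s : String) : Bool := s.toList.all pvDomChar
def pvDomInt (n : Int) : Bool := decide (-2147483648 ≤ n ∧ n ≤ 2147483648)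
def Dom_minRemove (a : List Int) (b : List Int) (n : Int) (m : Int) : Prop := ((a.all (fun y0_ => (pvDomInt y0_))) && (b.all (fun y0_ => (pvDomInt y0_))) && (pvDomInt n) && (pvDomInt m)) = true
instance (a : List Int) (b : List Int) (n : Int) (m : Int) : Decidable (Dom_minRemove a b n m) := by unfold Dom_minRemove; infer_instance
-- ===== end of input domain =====

-- B replaces A's two hash-counter passes plus a min-of-counts sum with greedy one-to-one
-- pair matching (remove one matching occurrence of each a-element from a copy of b's prefix);
-- alternative algorithm, same return value wherever A returns.


-- ===== PORT A =====
-- countA[a[i]] = countA.get(a[i], 0) + 1 over range(n); note A reads b with n, not m.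
-- a[i]/b[i] lookups are ported with pyGetD (default 0): Pre_ guarantees every index is in range.
def minRemove (a : List Int) (b : List Int) (n : Int) (m : Int) : Int :=
  let countA : PySem.Dict Int Int :=
    (PySem.List.pyRange 0 n 1).foldl
      (fun d i => d.insert (PySem.List.pyGetD a i 0) (d.getD (PySem.List.pyGetD a i 0) 0 + 1))
      PySem.Dict.empty
  let countB : PySem.Dict Int Int :=
    (PySem.List.pyRange 0 n 1).foldl
      (fun d i => d.insert (PySem.List.pyGetD b i 0) (d.getD (PySem.List.pyGetD b i 0) 0 + 1))
      PySem.Dict.empty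
  countA.keys.foldl
    (fun res x => if countB.keys.contains x then res + min (countA.getD x 0) (countB.getD x 0) else res)
    0

-- ===== PORT B =====
-- Greedy matching: for x in aa, if x in bb then bb.remove(x); res += 1.
-- bb.remove(x) is PySem.List.remove?; the contains guard makes it a 'some' (the none branch is unreachable).
def minRemove_alt (a : List Int) (b : List Int) (n : Int) (m : Int) : Int :=
  let aa := (PySem.List.pyRange 0 n 1).map (fun i => PySem.List.pyGetD a i 0)
  let bb := (PySem.List.pyRange 0 n 1).map (fun i => PySem.List.pyGetD b i 0)
  (aa.foldl
    (fun (s : Int × List Int) x =>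
      if s.2.contains x then
        match PySem.List.remove? s.2 x with
        | some r => (s.1 + 1, r)
        | none => s
      else s)
    (0, bb)).1

-- ===== PRECONDITION & SPEC =====
-- Exactly the inputs where A returns: a[i] and b[i] are read for every i in range(n),
-- so A raises IndexError iff n > len(a) or n > len(b) (negative n is fine: range(n) is empty).
def Pre_minRemove (a : List Int) (b : List Int) (n : Int) (m : Int) : Prop :=
  n ≤ (a.length : Int) ∧ n ≤ (b.length : Int)
instance (a : List Int) (b : List Int) (n : Int) (m : Int) : Decidable (Pre_minRemove a b n m) := by unfold Pre_minRemove; infer_instance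
def pvWitness_minRemove : List Int × List Int × Int × Int := ([1, 2, 2], [2, 3, 2], 3, 0)

def Spec_minRemove (a : List Int) (b : List Int) (n : Int) (m : Int) (out : Int) : Prop := out = minRemove_alt a b n m
instance (a : List Int) (b : List Int) (n : Int) (m : Int) (out : Int) : Decidable (Spec_minRemove a b n m out) := by unfold Spec_minRemove; infer_instance

-- ===== CLAIM (what is proved, stated in full; the proofs are below) =====
def Claim_equal_minRemove : Prop := ∀ (a : List Int) (b : List Int) (n : Int) (m : Int), Dom_minRemove a b n m → Pre_minRemove a b n m → Spec_minRemove a b n m (minRemove a b n m)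

-- ===== LEMMAS AND PROOFS =====

-- Indexing loop 'for i in range(n): … xs[i] …' folds over the prefix xs[:n] when 0 ≤ n ≤ len xs.
theorem foldl_range_getD_take {β : Type} (xs : List Int) (n : Int) (h0 : 0 ≤ n)
    (h : n ≤ (xs.length : Int)) (g : β → Int → β) (init : β) :
    (PySem.List.pyRange 0 n 1).foldl (fun acc i => g acc (PySem.List.pyGetD xs i 0)) init
      = (xs.take n.toNat).foldl g init := by
  have htk : (xs.take n.toNat).length = n.toNat := by simp; omega
  have hlen : (PySem.List.len (xs.take n.toNat)) = n := by
    simp [PySem.List.len, htk]; omega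
  have h1 : (PySem.List.pyRange 0 n 1).foldl
      (fun acc i => g acc (PySem.List.pyGetD xs i 0)) init
      = (PySem.List.pyRange 0 n 1).foldl
        (fun acc i => g acc (PySem.List.pyGetD (xs.take n.toNat) i 0)) init := by
    apply PySem.List.foldl_congr_mem
    intro acc i hi
    rw [PySem.List.mem_pyRange_one] at hi
    rw [PySem.List.pyGetD_of_nonneg _ _ hi.1, PySem.List.pyGetD_of_nonneg _ _ hi.1]
    have hlt : i.toNat < n.toNat := by omega
    have harg : (List.take n.toNat xs).getD i.toNat 0 = xs.getD i.toNat 0 := by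
      simp [List.getD, hlt]
    rw [harg]
  rw [h1]
  generalize hgen : xs.take n.toNat = t at hlen ⊢
  rw [← hlen]
  simpa using PySem.List.foldl_pyRange_pyGetD t 0 g init (le_refl 0)

-- The comprehension '[xs[i] for i in range(n)]' is the prefix xs[:n] when 0 ≤ n ≤ len xs.
theorem map_range_getD_take (xs : List Int) (n : Int) (h0 : 0 ≤ n)
    (h : n ≤ (xs.length : Int)) :
    (PySem.List.pyRange 0 n 1).map (fun i => PySem.List.pyGetD xs i 0) = xs.take n.toNat := by
  have h1 := foldl_range_getD_take xs n h0 h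
    (fun (acc : List Int) (v : Int) => acc ++ [v]) []
  simp only [PySem.List.foldl_append_singleton_eq_map, List.nil_append] at h1
  simpa using h1

theorem counter_of_range_loop (xs : List Int) (n : Int) (h0 : 0 ≤ n) (h : n ≤ (xs.length : Int)) :
    (PySem.List.pyRange 0 n 1).foldl
      (fun d i => d.insert (PySem.List.pyGetD xs i 0) (d.getD (PySem.List.pyGetD xs i 0) 0 + 1))
      PySem.Dict.empty
      = PySem.Dict.counter (xs.take n.toNat) := by
  have h2 := foldl_range_getD_take xs n h0 h
    (fun d x => d.insert x (d.getD x 0 + 1)) (PySem.Dict.empty (κ := Int) (ν := Int))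
  exact h2.trans (PySem.Dict.foldl_insert_getD_add_one_eq_counter _)

-- A nodup list covering all elements of l splits l's length into per-value counts.
theorem len_eq_sum_counts (K : List Int) : ∀ (l : List Int), K.Nodup → (∀ x ∈ l, x ∈ K) →
    (l.length : Int) = (K.map (fun x => (l.count x : Int))).sum := by
  induction K with
  | nil =>
    intro l _ hcov
    have hnil : l = [] := List.eq_nil_iff_forall_not_mem.mpr
      (fun x hx => List.not_mem_nil (hcov x hx))
    simp [hnil]
  | cons k K ih =>
    intro l hnd hcov
    have hk : k ∉ K := (List.nodup_cons.mp hnd).1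
    have hnd' : K.Nodup := (List.nodup_cons.mp hnd).2
    set l' := l.filter (fun y => !(y == k)) with hl'
    have hsplit : l.length = l.count k + l'.length := by
      rw [hl']; clear hl' hcov
      induction l with
      | nil => simp
      | cons x t iht =>
        by_cases hx : x = k <;> simp [hx, iht] <;> omega
    have hcov' : ∀ x ∈ l', x ∈ K := by
      intro x hx
      rw [hl', List.mem_filter] at hx
      have hne : x ≠ k := by simpa using hx.2
      rcases List.mem_cons.mp (hcov x hx.1) with he | hmem
      · exact absurd he hne
      · exact hmem
    have hih := ih l' hnd' hcov'
    have hmap : K.map (fun x => (l'.count x : Int)) = K.map (fun x => (l.count x : Int)) := by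
      apply List.map_congr_left
      intro x hx
      have hne : x ≠ k := fun he => hk (he ▸ hx)
      rw [hl', List.count_filter (by simpa using hne)]
    rw [hmap] at hih
    simp only [List.map_cons, List.sum_cons]
    omega

-- Sum over the filtered list equals the full sum when dropped terms are zero.
theorem sum_filter_of_zero (f : Int → Int) (p : Int → Bool) :
    ∀ (K : List Int), (∀ x ∈ K, p x = false → f x = 0) →
    ((K.filter p).map f).sum = (K.map f).sum := by
  intro K
  induction K with
  | nil => intro _; rfl
  | cons k K ih =>
    intro h0
    have ih' := ih (fun x hx => h0 x (List.mem_cons_of_mem _ hx))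
    cases hp : p k with
    | true => simp [hp, ih']
    | false =>
      have hf : f k = 0 := h0 k List.mem_cons_self hp
      simp [hp, ih', hf]

-- A's final loop (sum of min counts over distinct common elements) computes |aa ∩ bb| as multisets.
theorem sum_min_counts_eq_bagInter (aa bb : List Int) :
    (PySem.Set.ofList aa).foldl
      (fun res x => if List.contains (PySem.Set.ofList bb) x then
          res + min ((aa.count x : Int)) ((bb.count x : Int)) else res) 0
      = ((aa.bagInter bb).length : Int) := by
  rw [PySem.List.foldl_if_eq_foldl_filter, PySem.List.foldl_add, zero_add]
  rw [sum_filter_of_zero _ _ (PySem.Set.ofList aa) (by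
    intro x _ hpf
    have hxb : x ∉ bb := by
      intro hxb
      rw [List.contains_iff_mem.mpr ((PySem.Set.mem_ofList bb x).mpr hxb)] at hpf
      simp at hpf
    have h0b : (bb.count x : Int) = 0 := by
      simp [List.count_eq_zero.mpr hxb]
    rw [h0b]
    exact min_eq_right (by positivity))]
  rw [len_eq_sum_counts (PySem.Set.ofList aa) (aa.bagInter bb) (PySem.Set.nodup_ofList aa)
    (fun x hx => (PySem.Set.mem_ofList aa x).mpr (List.mem_bagInter.mp hx).1)]
  congr 1
  apply List.map_congr_left
  intro x _
  rw [List.count_bagInter]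
  push_cast
  rfl

-- B's greedy matching loop computes |aa ∩ bb| as multisets.
theorem greedy_match_eq_bagInter :
    ∀ (aa bb : List Int) (res : Int),
    (aa.foldl
      (fun (s : Int × List Int) x =>
        if s.2.contains x then
          match PySem.List.remove? s.2 x with
          | some r => (s.1 + 1, r)
          | none => s
        else s)
      (res, bb)).1 = res + ((aa.bagInter bb).length : Int) := by
  intro aa
  induction aa with
  | nil => intro bb res; simp [List.nil_bagInter]
  | cons x t ih =>
    intro bb res
    rw [List.foldl_cons]
    by_cases hm : x ∈ bb
    · have hc : bb.contains x = true := List.contains_iff_mem.mpr hm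
      simp only [hc, if_pos, PySem.List.remove?_eq_some_erase bb x hm]
      rw [ih (bb.erase x) (res + 1), List.cons_bagInter_of_pos _ hm]
      simp only [List.length_cons]
      push_cast
      ring
    · have hc : bb.contains x = false := by simpa using hm
      simp only [hc, Bool.false_eq_true, if_neg, not_false_iff]
      rw [ih bb res, List.cons_bagInter_of_neg _ hm]

-- ===== VERDICT =====
theorem minRemove_spec : Claim_equal_minRemove := by
  intro a b n m _ hpre
  unfold Spec_minRemove minRemove minRemove_alt
  obtain ⟨ha, hb⟩ := hpre
  by_cases hn : n ≤ 0
  · simp [PySem.List.pyRange_one_eq_nil hn, PySem.Dict.empty, PySem.Dict.keys]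
  · rw [not_le] at hn
    dsimp only
    rw [counter_of_range_loop a n (le_of_lt hn) ha, counter_of_range_loop b n (le_of_lt hn) hb,
        map_range_getD_take a n (le_of_lt hn) ha, map_range_getD_take b n (le_of_lt hn) hb,
        PySem.Dict.keys_counter, PySem.Dict.keys_counter]
    have hfold : (PySem.Set.ofList (a.take n.toNat)).foldl
        (fun res x => if List.contains (PySem.Set.ofList (b.take n.toNat)) x then
            res + min ((PySem.Dict.counter (a.take n.toNat)).getD x 0)
              ((PySem.Dict.counter (b.take n.toNat)).getD x 0) else res) 0
        = (PySem.Set.ofList (a.take n.toNat)).foldl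
          (fun res x => if List.contains (PySem.Set.ofList (b.take n.toNat)) x then
              res + min (((a.take n.toNat).count x : Int)) (((b.take n.toNat).count x : Int))
            else res) 0 := by
      apply PySem.List.foldl_congr_mem
      intro acc x _
      rw [PySem.Dict.getD_counter, PySem.Dict.getD_counter]
    rw [hfold, sum_min_counts_eq_bagInter, greedy_match_eq_bagInter]
    omega
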